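-- pv_equiv track=rewrite | github.com/simondvdv/module2hard | module2hard.py | required_password_searching
-- ===== SOURCE A (Python) =====
-- def number_divisors(number):            #Функция которая находит все делители числа (кроме 1)
--     list_of_divisors = []
--     for i in range(2, number + 1):
--         if number % i == 0:
--             list_of_divisors.append(i)
--     return list_of_divisors
--
-- def required_password_searching(number):   #Функция которая подбирает пароли, чтобы исключить пары типа: 12 и 21.
--     divisors = number_divisors(number)     #Перебор первого числа пароля не превосходит половины числа + 1
--     password = ''
--     for j in range(1, (divisors[-1] // 2) + 1):
--         for k in range(j + 1, divisors[-1]):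
--             if divisors[-1] % (j + k) == 0 and j != k:
--                 password += str(j) + str(k)
--     return password
-- ===== SOURCE B (Python) =====
-- def required_password_searching(number):
--     n = number
--     divs = [d for d in range(1, n + 1) if n % d == 0]
--     parts = []
--     for j in range(1, n // 2 + 1):
--         for d in divs:
--             if d > 2 * j:
--                 parts.append(str(j) + str(d - j))
--     return ''.join(parts)
-- ===== Notes on version B (the rewrite author's own statement) =====
-- stated objective: faster
-- what changed: B computes the divisor list of number once with a single linear scan and, for each j, emits j,(d-j) for every divisor d > 2j, replacing A's O(n^2) double loop over all pairs (which also recomputes divisors only to read back number itself as divisors[-1]) by an O(n + n*d(n)) divisor-driven scan.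
import Mathlib
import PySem

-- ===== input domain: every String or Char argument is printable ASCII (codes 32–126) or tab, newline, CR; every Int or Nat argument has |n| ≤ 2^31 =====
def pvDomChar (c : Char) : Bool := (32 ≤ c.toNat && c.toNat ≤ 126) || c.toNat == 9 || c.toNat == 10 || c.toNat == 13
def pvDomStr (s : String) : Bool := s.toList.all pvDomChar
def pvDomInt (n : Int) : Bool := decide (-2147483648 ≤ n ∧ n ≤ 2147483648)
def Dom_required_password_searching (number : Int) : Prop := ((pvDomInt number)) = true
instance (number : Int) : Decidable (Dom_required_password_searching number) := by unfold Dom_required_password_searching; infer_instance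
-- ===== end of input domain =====

-- B replaces A's O(n^2) pair scan by one linear divisor scan plus a divisor-driven inner loop
-- (faster, asymptotic); Python strings are modelled as List Char built with PySem.Int.toChars.


-- ===== PORT A =====
def pvNumberDivisors (number : Int) : List Int :=
  (PySem.List.pyRange 2 (number + 1)).foldl
    (fun acc i => if PySem.Int.mod number i == 0 then acc ++ [i] else acc) []

def required_password_searching (number : Int) : String :=
  match PySem.List.pyGet? (pvNumberDivisors number) (-1) with
  | none => ""      -- divisors[-1] raises IndexError in Python; excluded by Pre_
  | some last =>
      String.mk ((PySem.List.pyRange 1 (PySem.Int.floordiv last 2 + 1)).foldl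
        (fun pw j =>
          (PySem.List.pyRange (j + 1) last).foldl
            (fun pw k =>
              if (PySem.Int.mod last (j + k) == 0) && !(j == k)
              then pw ++ (PySem.Int.toChars j ++ PySem.Int.toChars k) else pw) pw) [])

-- ===== PORT B =====
def required_password_searching_alt (number : Int) : String :=
  let n := number
  let divs := (PySem.List.pyRange 1 (n + 1)).filter (fun d => PySem.Int.mod n d == 0)
  let parts := (PySem.List.pyRange 1 (PySem.Int.floordiv n 2 + 1)).foldl
    (fun acc j =>
      divs.foldl
        (fun acc d =>
          if decide (2 * j < d)
          then acc ++ [PySem.Int.toChars j ++ PySem.Int.toChars (d - j)] else acc) acc)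
    ([] : List (List Char))
  String.mk parts.flatten

-- ===== PRECONDITION & SPEC =====
-- Pre_ excludes exactly number < 2, where the divisor list is empty and A raises IndexError.
def Pre_required_password_searching (number : Int) : Prop := 2 ≤ number
instance (number : Int) : Decidable (Pre_required_password_searching number) := by unfold Pre_required_password_searching; infer_instance
def pvWitness_required_password_searching : Int := 12

def Spec_required_password_searching (number : Int) (out : String) : Prop := out = required_password_searching_alt number
instance (number : Int) (out : String) : Decidable (Spec_required_password_searching number out) := by unfold Spec_required_password_searching; infer_instance

-- ===== CLAIM (what is proved, stated in full; the proofs are below) =====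
def Claim_equal_required_password_searching : Prop := ∀ (number : Int), Dom_required_password_searching number → Pre_required_password_searching number → Spec_required_password_searching number (required_password_searching number)

-- ===== LEMMAS AND PROOFS =====

theorem pvRange_split (a m b : Int) (h1 : a ≤ m) (h2 : m ≤ b) :
    PySem.List.pyRange a b = PySem.List.pyRange a m ++ PySem.List.pyRange m b := by
  obtain ⟨d, hd⟩ : ∃ d : Nat, b = m + d := ⟨(b - m).toNat, by omega⟩
  subst hd
  clear h2
  induction d with
  | zero => simp [PySem.List.pyRange]
  | succ k ih =>
    have he : m + ((k + 1 : Nat) : Int) = (m + (k : Nat)) + 1 := by push_cast; ring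
    rw [he, PySem.List.pyRange_one_succ_right (by omega),
        PySem.List.pyRange_one_succ_right (by omega : m ≤ m + (k : Nat)), ih, List.append_assoc]

theorem pvRange_map_shift (a b j : Int) :
    (PySem.List.pyRange a b).map (fun k => j + k) = PySem.List.pyRange (a + j) (b + j) := by
  simp only [PySem.List.pyRange]
  norm_num
  split_ifs <;> omega

theorem pvFlatMap_ite {α β : Type} (p : α → Bool) (g : α → List β) (l : List α) :
    l.flatMap (fun x => if p x then g x else []) = (l.filter p).flatMap g := by
  induction l with
  | nil => rfl
  | cons x xs ih => by_cases h : p x <;> simp [h, ih]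

theorem pvFlatMap_congr {α β : Type} (l : List α) (g h : α → List β) (hg : ∀ x ∈ l, g x = h x) :
    l.flatMap g = l.flatMap h := by
  induction l with
  | nil => rfl
  | cons x xs ih =>
    simp [List.flatMap_cons, hg x (by simp), ih (fun y hy => hg y (by simp [hy]))]

theorem pvFlatten_flatMap {α β : Type} (l : List α) (g : α → List (List β)) :
    (l.flatMap g).flatten = l.flatMap (fun x => (g x).flatten) := by
  induction l with
  | nil => rfl
  | cons x xs ih => simp [ih]

theorem pvGetLast {α : Type} (xs : List α) (v : α) :
    PySem.List.pyGet? (xs ++ [v]) (-1) = some v := by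
  simp [PySem.List.pyGet?, PySem.List.pyIdx?]

-- the divisor list computed by A
theorem pvDivisorsA (n : Int) :
    pvNumberDivisors n
      = (PySem.List.pyRange 2 (n + 1)).filter (fun i => PySem.Int.mod n i == 0) := by
  unfold pvNumberDivisors
  rw [PySem.List.foldl_append_if (fun i => PySem.Int.mod n i == 0) (fun i => i)]
  simp

theorem pvDivisorsA_last (n : Int) (h : 2 ≤ n) :
    PySem.List.pyGet? (pvNumberDivisors n) (-1) = some n := by
  rw [pvDivisorsA, PySem.List.pyRange_one_succ_right (by omega : (2:Int) ≤ n),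
      List.filter_append]
  have hn : (PySem.Int.mod n n == 0) = true := by
    simp [PySem.Int.mod_eq_zero_iff_dvd]
  simp only [List.filter_cons, hn, List.filter_nil]
  exact pvGetLast _ n

-- divisors of n in (2j, n] are exactly j + (the k's A keeps), in the same order
theorem pvIndexLists (n j : Int) (hn : 2 ≤ n) (hj : 1 ≤ j) (h2j : 2 * j ≤ n) :
    ((PySem.List.pyRange 1 (n + 1)).filter (fun d => PySem.Int.mod n d == 0)).filter
        (fun d => decide (2 * j < d))
      = ((PySem.List.pyRange (j + 1) n).filter (fun k => PySem.Int.mod n (j + k) == 0)).map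
          (fun k => j + k) := by
  have hc : (fun k => PySem.Int.mod n (j + k) == 0)
      = ((fun d => PySem.Int.mod n d == 0) ∘ (fun k => j + k)) := rfl
  rw [hc, ← List.filter_map, pvRange_map_shift, List.filter_filter]
  have e1 : j + 1 + j = 2 * j + 1 := by ring
  rw [e1, pvRange_split 1 (2 * j + 1) (n + 1) (by omega) (by omega),
      pvRange_split (2 * j + 1) (n + 1) (n + j) (by omega) (by omega),
      List.filter_append, List.filter_append]
  have h1 : ((PySem.List.pyRange 1 (2 * j + 1)).filter
      (fun d => decide (2 * j < d) && (PySem.Int.mod n d == 0))) = [] := by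
    rw [List.filter_eq_nil_iff]
    intro d hd
    rw [PySem.List.mem_pyRange_one] at hd
    simp only [Bool.and_eq_true, decide_eq_true_eq]
    omega
  have h2 : ((PySem.List.pyRange (n + 1) (n + j)).filter
      (fun d => PySem.Int.mod n d == 0)) = [] := by
    rw [List.filter_eq_nil_iff]
    intro d hd
    rw [PySem.List.mem_pyRange_one] at hd
    have hd0 : (0:Int) < d := by omega
    rw [PySem.Int.mod_eq_emod_of_pos hd0, Int.emod_eq_of_lt (by omega) (by omega)]
    simp
    omega
  rw [h1, h2, List.append_nil, List.nil_append]
  apply List.filter_congr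
  intro d hd
  rw [PySem.List.mem_pyRange_one] at hd
  have : (decide (2 * j < d)) = true := by simp; omega
  rw [this, Bool.true_and]

-- A's whole output as one flatMap
theorem pvA_flat (n : Int) (h : 2 ≤ n) :
    required_password_searching n
      = String.mk ((PySem.List.pyRange 1 (PySem.Int.floordiv n 2 + 1)).flatMap
          (fun j => ((PySem.List.pyRange (j + 1) n).filter
              (fun k => PySem.Int.mod n (j + k) == 0)).flatMap
            (fun k => PySem.Int.toChars j ++ PySem.Int.toChars k))) := by
  unfold required_password_searching
  rw [pvDivisorsA_last n h]
  dsimp only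
  congr 1
  rw [PySem.List.foldl_congr_mem _ _
      (fun pw j => pw ++ ((PySem.List.pyRange (j + 1) n).filter
          (fun k => PySem.Int.mod n (j + k) == 0)).flatMap
        (fun k => PySem.Int.toChars j ++ PySem.Int.toChars k)) _ ?_]
  · rw [PySem.List.foldl_append_eq_flatMap, List.nil_append]
  · intro acc j hj
    rw [PySem.List.mem_pyRange_one] at hj
    rw [PySem.List.foldl_congr_mem _ _
        (fun pw k => pw ++ (if (PySem.Int.mod n (j + k) == 0)
            then PySem.Int.toChars j ++ PySem.Int.toChars k else [])) _ ?_]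
    · rw [PySem.List.foldl_append_eq_flatMap, pvFlatMap_ite]
    · intro pw k hk
      rw [PySem.List.mem_pyRange_one] at hk
      have hne : (!(j == k)) = true := by simp; omega
      rw [hne, Bool.and_true]
      split <;> simp [*]

-- B's whole output as one flatMap
theorem pvB_flat (n : Int) :
    required_password_searching_alt n
      = String.mk ((PySem.List.pyRange 1 (PySem.Int.floordiv n 2 + 1)).flatMap
          (fun j => ((((PySem.List.pyRange 1 (n + 1)).filter
                (fun d => PySem.Int.mod n d == 0)).filter
              (fun d => decide (2 * j < d))).flatMap
            (fun d => PySem.Int.toChars j ++ PySem.Int.toChars (d - j))))) := by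
  unfold required_password_searching_alt
  dsimp only
  congr 1
  rw [PySem.List.foldl_congr_mem _ _
      (fun acc j => acc ++ (((PySem.List.pyRange 1 (n + 1)).filter
            (fun d => PySem.Int.mod n d == 0)).filter
          (fun d => decide (2 * j < d))).map
        (fun d => PySem.Int.toChars j ++ PySem.Int.toChars (d - j))) _ ?_]
  · rw [PySem.List.foldl_append_eq_flatMap, List.nil_append, pvFlatten_flatMap]
    apply pvFlatMap_congr
    intro j _
    rw [← List.flatMap_def]
  · intro acc j hj
    rw [PySem.List.foldl_append_if]

-- ===== VERDICT (by name: the statement is the Claim_ definition above) =====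
theorem required_password_searching_spec : Claim_equal_required_password_searching := by
  intro n _ hpre
  have h2 : 2 ≤ n := hpre
  unfold Spec_required_password_searching
  rw [pvA_flat n h2, pvB_flat n]
  congr 1
  apply pvFlatMap_congr
  intro j hj
  rw [PySem.List.mem_pyRange_one] at hj
  have hj2 : 2 * j ≤ n := by
    have := hj.2
    have : j ≤ PySem.Int.floordiv n 2 := by omega
    have h := (PySem.Int.le_floordiv_iff_mul_le (a := n) (b := 2) (q := j) (by omega)).mp this
    omega
  rw [pvIndexLists n j h2 hj.1 hj2, List.flatMap_map]
  apply pvFlatMap_congr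
  intro k _
  have : j + k - j = k := by ring
  rw [this]
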